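-- pv_equiv track=rewrite | github.com/michaelecryan/ai-leadsheet | leadsheet/simplify.py | _suggest_capo
-- ===== SOURCE A (Python) =====
-- _PITCH_TO_SEMITONE: dict[str, int] = {
--     "C": 0,  "B#": 0,
--     "C#": 1, "D-": 1,
--     "D": 2,
--     "D#": 3, "E-": 3,
--     "E": 4,  "F-": 4,
--     "F": 5,  "E#": 5,
--     "F#": 6, "G-": 6,
--     "G": 7,
--     "G#": 8, "A-": 8,
--     "A": 9,
--     "A#": 10, "B-": 10,
--     "B": 11, "C-": 11,
-- }
--
-- _FRIENDLY_MAJOR = {0, 2, 4, 7, 9}   # C D E G A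
--
-- _FRIENDLY_MINOR = {9, 4, 2, 11}     # Am Em Dm Bm
--
-- def _suggest_capo(key: str) -> int | None:
--     """Return the lowest capo fret that puts the key into a guitar-friendly shape key.
--
--     Capo N means the player uses shapes N semitones below the actual key.
--     e.g. Bb major + capo 1 → play A major shapes.
--     """
--     tonic, mode = key.split(" ", 1)
--     semitone = _PITCH_TO_SEMITONE.get(tonic, 0)
--     friendly = _FRIENDLY_MAJOR if mode == "major" else _FRIENDLY_MINOR
--
--     if semitone in friendly:
--         return None
--
--     for capo in range(1, 8):  # practical capo range: frets 1–7
--         if (semitone - capo) % 12 in friendly: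
--             return capo
--
--     return None
-- ===== SOURCE B (Python) =====
-- _PITCH_TO_SEMITONE: dict[str, int] = {
--     "C": 0,  "B#": 0,
--     "C#": 1, "D-": 1,
--     "D": 2,
--     "D#": 3, "E-": 3,
--     "E": 4,  "F-": 4,
--     "F": 5,  "E#": 5,
--     "F#": 6, "G-": 6,
--     "G": 7,
--     "G#": 8, "A-": 8,
--     "A": 9,
--     "A#": 10, "B-": 10,
--     "B": 11, "C-": 11,
-- }
--
-- _FRIENDLY_MAJOR = {0, 2, 4, 7, 9}   # C D E G A
--
-- _FRIENDLY_MINOR = {9, 4, 2, 11}     # Am Em Dm Bm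
--
--
-- def _suggest_capo(key: str) -> int | None:
--     """Lowest capo fret (1-7) putting the key into a friendly shape, else None.
--
--     Instead of scanning capo frets 1..7, compute for each friendly target the
--     capo it would require, (semitone - target) % 12, and take the minimum of
--     those that fall in the practical 1..7 range.
--     """
--     tonic, mode = key.split(" ", 1)
--     semitone = _PITCH_TO_SEMITONE.get(tonic, 0)
--     friendly = _FRIENDLY_MAJOR if mode == "major" else _FRIENDLY_MINOR
--
--     if semitone in friendly:
--         return None
--
--     candidates = [(semitone - t) % 12 for t in friendly if 1 <= (semitone - t) % 12 <= 7]
--     return min(candidates, default=None)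
-- ===== Notes on version B (the rewrite author's own statement) =====
-- stated objective: alternative
-- what changed: Replaces the scan over capo frets 1..7 testing (semitone-capo)%12 against the friendly set by computing, for each friendly target, the capo it requires, (semitone-target)%12, filtering to 1..7 and taking the minimum.
import Mathlib
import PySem

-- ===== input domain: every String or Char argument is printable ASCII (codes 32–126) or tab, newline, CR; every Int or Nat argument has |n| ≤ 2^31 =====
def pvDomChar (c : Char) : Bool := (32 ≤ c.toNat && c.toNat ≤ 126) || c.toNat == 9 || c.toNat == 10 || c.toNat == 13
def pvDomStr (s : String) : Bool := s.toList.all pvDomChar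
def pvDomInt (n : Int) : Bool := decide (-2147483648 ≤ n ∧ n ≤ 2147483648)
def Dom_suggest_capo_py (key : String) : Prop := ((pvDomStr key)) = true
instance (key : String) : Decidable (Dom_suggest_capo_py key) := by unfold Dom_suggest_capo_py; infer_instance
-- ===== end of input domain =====

-- B replaces A's scan over capo frets 1..7 by computing each friendly target's required capo and taking the minimum in 1..7 (alternative decomposition, same cost class).


-- ===== PORT A =====
-- module constant _PITCH_TO_SEMITONE (dict literal, keys distinct)
def pvPitch : PySem.Dict String Int := PySem.Dict.mk
  [("C", 0), ("B#", 0), ("C#", 1), ("D-", 1), ("D", 2), ("D#", 3), ("E-", 3),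
   ("E", 4), ("F-", 4), ("F", 5), ("E#", 5), ("F#", 6), ("G-", 6), ("G", 7),
   ("G#", 8), ("A-", 8), ("A", 9), ("A#", 10), ("B-", 10), ("B", 11), ("C-", 11)]

-- module constants _FRIENDLY_MAJOR / _FRIENDLY_MINOR (set literals)
def pvFriendlyMajor : PySem.Set Int := PySem.Set.ofList [0, 2, 4, 7, 9]
def pvFriendlyMinor : PySem.Set Int := PySem.Set.ofList [9, 4, 2, 11]

-- the 'for capo in range(1, 8): if …: return capo' loop
def pvScanCapo (semitone : Int) (friendly : List Int) : List Int → Option Int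
  | [] => none
  | capo :: rest =>
    if friendly.contains (PySem.Int.mod (semitone - capo) 12) then some capo
    else pvScanCapo semitone friendly rest

def suggest_capo_py (key : String) : Option Int :=
  match PySem.Str.splitMax? key " " 1 with
  | some [tonic, mode] =>
    let semitone := pvPitch.getD tonic 0
    let friendly := if mode == "major" then pvFriendlyMajor else pvFriendlyMinor
    if friendly.contains semitone then none
    else pvScanCapo semitone friendly (PySem.List.pyRange 1 8 1)
  | _ => none  -- tuple unpacking raises ValueError here; excluded by Pre_

-- ===== PORT B =====
def suggest_capo_py_alt (key : String) : Option Int :=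
  -- the tuple unpacking of the split needs exactly two pieces, else Python raises ValueError (excluded by Pre_)
  let parts := (PySem.Str.splitMax? key " " 1).getD []
  if parts.length == 2 then
    let tonic := parts.headI
    let mode := (parts.drop 1).headI
    let semitone := pvPitch.getD tonic 0
    let friendly := if mode == "major" then pvFriendlyMajor else pvFriendlyMinor
    if friendly.contains semitone then none
    else
      let candidates := (friendly.map (fun t => PySem.Int.mod (semitone - t) 12)).filter
        (fun c => decide (1 ≤ c ∧ c ≤ 7))
      PySem.List.min? candidates (fun x => x)
  else none

-- ===== PRECONDITION & SPEC =====
-- Pre_ excludes exactly the keys without a space, on which A's tuple unpacking of the split raises ValueError.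
def Pre_suggest_capo_py (key : String) : Prop := PySem.Str.isIn " " key = true
instance (key : String) : Decidable (Pre_suggest_capo_py key) := by unfold Pre_suggest_capo_py; infer_instance
def pvWitness_suggest_capo_py : String := "C major"

def Spec_suggest_capo_py (key : String) (out : Option Int) : Prop := out = suggest_capo_py_alt key
instance (key : String) (out : Option Int) : Decidable (Spec_suggest_capo_py key out) := by unfold Spec_suggest_capo_py; infer_instance

-- ===== CLAIM (what is proved, stated in full; the proofs are below) =====
def Claim_equal_suggest_capo_py : Prop := ∀ (key : String), Dom_suggest_capo_py key → Pre_suggest_capo_py key → Spec_suggest_capo_py key (suggest_capo_py key)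

-- ===== LEMMAS AND PROOFS =====

-- every value the semitone lookup can produce lies in 0..11
lemma pvPitch_getD_bound (t : String) : 0 ≤ pvPitch.getD t 0 ∧ pvPitch.getD t 0 < 12 := by
  unfold pvPitch PySem.Dict.getD PySem.Dict.get?
  rcases h : List.find? (fun p => p.1 == t)
    [("C", (0:Int)), ("B#", 0), ("C#", 1), ("D-", 1), ("D", 2), ("D#", 3), ("E-", 3),
     ("E", 4), ("F-", 4), ("F", 5), ("E#", 5), ("F#", 6), ("G-", 6), ("G", 7),
     ("G#", 8), ("A-", 8), ("A", 9), ("A#", 10), ("B-", 10), ("B", 11), ("C-", 11)] with _ | p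
  · simp [h]
  · have hm := List.mem_of_find?_eq_some h
    simp only [h, Option.map_some, Option.getD_some]
    fin_cases hm <;> norm_num

-- the scan over capos 1..7 equals the min of the per-target required capos, for both friendly sets and every semitone 0..11
lemma pv_core (fr : List Int) (hfr : fr = pvFriendlyMajor ∨ fr = pvFriendlyMinor)
    (s : Int) (h0 : 0 ≤ s) (h12 : s < 12) :
    (if fr.contains s then none
     else pvScanCapo s fr (PySem.List.pyRange 1 8 1)) =
    (if fr.contains s then none
     else PySem.List.min? ((fr.map (fun t => PySem.Int.mod (s - t) 12)).filter
        (fun c => decide (1 ≤ c ∧ c ≤ 7))) (fun x => x)) := by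
  interval_cases s <;> rcases hfr with rfl | rfl <;> decide

-- ===== VERDICT (by name: the statement is the Claim_ definition above) =====
theorem suggest_capo_py_spec : Claim_equal_suggest_capo_py := by
  intro key _ _
  unfold Spec_suggest_capo_py suggest_capo_py suggest_capo_py_alt
  cases h : PySem.Str.splitMax? key " " 1 with
  | none => rfl
  | some l =>
    match l with
    | [] => rfl
    | [_] => rfl
    | _ :: _ :: _ :: _ => rfl
    | [tonic, mode] =>
      simp only [Option.getD_some, List.length_cons, List.length_nil, List.headI, List.drop_one,
        List.tail_cons, Nat.reduceBEq, if_true, beq_self_eq_true]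
      obtain ⟨h0, h12⟩ := pvPitch_getD_bound tonic
      by_cases hm : mode == "major" <;> simp only [hm, if_true, if_false, Bool.false_eq_true]
      · exact pv_core pvFriendlyMajor (Or.inl rfl) _ h0 h12
      · exact pv_core pvFriendlyMinor (Or.inr rfl) _ h0 h12
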